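-- pv_equiv track=rewrite | github.com/KuangDW/CoachAI-Plus | Tactic_Evaluation/Utils/Tactic.py | Full_Court_Pressure
-- ===== SOURCE A (Python) =====
-- def union_intervals(intervals):
--
--     if not intervals:
--         return []
--
--     # Step 1: Flatten the nested intervals
--     interval_pieces = [item for sublist in intervals if sublist is not None for item in sublist]
--
--     if not interval_pieces:
--         return []
--
--     # Step 2: Sort intervals by the start point
--     interval_pieces.sort(key=lambda x: x[0])
--
--     # Step 3: Initialize result with the first interval
--     merged = [interval_pieces[0]]
--
--     # Step 4: Iterate through intervals and merge them if necessary
--     for current in interval_pieces[1:]: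
--         last_merged = merged[-1]
--
--         # If the current interval overlaps or is adjacent to the last merged one
--         if current[0] <= last_merged[1] + 1 :
--             # Merge the intervals by updating the end of the last merged interval
--             last_merged[1] = max(last_merged[1], current[1])
--         else:
--             # No overlap, add the current interval to the result
--             merged.append(current)
--     merged.sort(key=lambda x: x[1])
--
--     return merged
--
-- def Full_Court_Pressure(rally):
--     """判斷全面下壓"""
--
--     intervals = []
--
--     actions = [action[3] for action in rally]  # 假設rally中的每個action都是一個列表，第四個元素是動作類型
--     n = len(actions)
--     prefix_scores = [0] * (n + 1)
--
--     # Calculate prefix scores based on action types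
--     for i in range(n):
--         action = actions[i]
--         score = 1 if action in ['Slice', 'Net Shot'] else 2 if action == 'Smash' else 0
--         prefix_scores[i + 1] = prefix_scores[i] + score
--
--     # Define target scores for sequences of 2, 3, and 4 shots
--     targets = {2: 3, 3: 4, 4: 5}
--
--     # Check for sequences of length 2 to 4
--     for length in targets:
--         for i in range(n - length + 1):
--             score = prefix_scores[i + length] - prefix_scores[i]
--             if score >= targets[length]:
--                 # Store the interval as 1-indexed positions
--                 intervals.append([i + 1, i + length])
--
--     intervals = [intervals]
--
--     intervals = union_intervals(intervals)
--
--     return intervals if intervals != [] else None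
-- ===== SOURCE B (Python) =====
-- def Full_Court_Pressure(rally):
--     """判斷全面下壓 — coverage-array formulation: mark positions hit by a
--     qualifying window, then emit maximal runs of covered positions."""
--     scores = [1 if a[3] in ('Slice', 'Net Shot') else 2 if a[3] == 'Smash' else 0
--               for a in rally]
--     n = len(scores)
--     covered = [
--         any(sum(scores[i:i + L]) >= t
--             for (L, t) in ((2, 3), (3, 4), (4, 5))
--             for i in range(max(0, j - L + 1), min(j + 1, n - L + 1)))
--         for j in range(n)
--     ]
--     runs = []
--     i = 0
--     while i < n:
--         if covered[i]:
--             j = i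
--             while j + 1 < n and covered[j + 1]:
--                 j += 1
--             runs.append([i + 1, j + 1])
--             i = j + 1
--         else:
--             i += 1
--     return runs if runs else None
-- ===== Notes on version B (the rewrite author's own statement) =====
-- stated objective: alternative
-- what changed: Instead of collecting threshold windows as intervals and then sort-merge-sorting them (prefix sums + union_intervals), B marks a per-position coverage array from qualifying windows and emits the maximal runs of covered positions in one linear sweep, with no sorting or interval merging.
import Mathlib
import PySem

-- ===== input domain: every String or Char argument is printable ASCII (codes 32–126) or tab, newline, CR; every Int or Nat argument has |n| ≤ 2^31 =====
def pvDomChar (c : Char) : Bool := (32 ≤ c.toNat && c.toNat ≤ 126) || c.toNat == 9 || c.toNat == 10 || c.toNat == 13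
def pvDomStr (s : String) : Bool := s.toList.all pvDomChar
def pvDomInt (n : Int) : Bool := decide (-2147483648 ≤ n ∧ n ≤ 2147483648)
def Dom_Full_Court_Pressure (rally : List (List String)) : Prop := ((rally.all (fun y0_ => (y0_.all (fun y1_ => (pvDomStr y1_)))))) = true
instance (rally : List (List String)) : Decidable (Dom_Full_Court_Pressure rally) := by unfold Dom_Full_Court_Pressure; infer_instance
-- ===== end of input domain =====

-- B re-implements A's window-threshold interval search as a coverage-array + run sweep; equivalence of return values is proved below.

-- ===== PORT A =====
-- score of one action string (A computes this inline when building prefix sums)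
def pyScore (s : String) : Int :=
  if s = "Slice" ∨ s = "Net Shot" then 1 else if s = "Smash" then 2 else 0

-- targets = {2: 3, 3: 4, 4: 5} (dict iterated in insertion order)
def fcpTargets : List (Int × Int) := [(2, 3), (3, 4), (4, 5)]

-- prefix_scores: the loop 'prefix_scores[i+1] = prefix_scores[i] + score'
def fcpPrefix (actions : List String) : List Int :=
  (List.range actions.length).foldl
    (fun ps i => ps ++ [ps.getD i 0 + pyScore (actions.getD i "")]) [0]

-- the window-collecting double loop of A
def fcpIntervals (actions : List String) : List (Int × Int) :=
  let n : Int := actions.length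
  let pref := fcpPrefix actions
  fcpTargets.foldl (fun acc Lt =>
    (PySem.List.pyRange 0 (n - Lt.1 + 1) 1).foldl (fun acc2 i =>
      if PySem.List.pyGetD pref (i + Lt.1) 0 - PySem.List.pyGetD pref i 0 ≥ Lt.2
      then acc2 ++ [(i + 1, i + Lt.1)] else acc2) acc) []

-- one step of union_intervals' merging loop; the state is (merged without its
-- last element, last element) so that 'merged[-1][1] = ...' is an update of .2
def fcpMergeStep (st : List (Int × Int) × (Int × Int)) (cur : Int × Int) :
    List (Int × Int) × (Int × Int) :=
  if cur.1 ≤ st.2.2 + 1 then (st.1, (st.2.1, max st.2.2 cur.2)) else (st.1 ++ [st.2], cur)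

-- union_intervals; the 'if sublist is not None' filter is vacuous at this type
def union_intervals (intervals : List (List (Int × Int))) : List (Int × Int) :=
  if intervals = [] then []
  else
    let pieces := intervals.flatten
    if pieces = [] then []
    else
      let sortedP := PySem.List.sorted pieces (fun p => p.1) false
      let first := PySem.List.pyGetD sortedP 0 (0, 0)   -- interval_pieces[0]; nonempty here
      let rest := PySem.List.slice sortedP (some 1) none -- interval_pieces[1:]
      let m := rest.foldl fcpMergeStep ([], first)
      PySem.List.sorted (m.1 ++ [m.2]) (fun p => p.2) false

def Full_Court_Pressure (rally : List (List String)) : Option (List (List Int)) :=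
  let actions := rally.map (fun action => PySem.List.pyGetD action 3 "")  -- action[3]; in range under Pre_
  let intervals := fcpIntervals actions
  let merged := union_intervals [intervals]
  if merged = [] then none else some (merged.map (fun p => [p.1, p.2]))

-- ===== PORT B =====
-- covered[j] ⟺ some qualifying window contains position j (0-based)
def fcpCovered (scores : List Int) : List Bool :=
  let n : Int := scores.length
  (PySem.List.pyRange 0 n 1).map (fun j =>
    ([((2 : Int), (3 : Int)), (3, 4), (4, 5)]).any (fun Lt =>
      (PySem.List.pyRange (max 0 (j - Lt.1 + 1)) (min (j + 1) (n - Lt.1 + 1)) 1).any (fun i =>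
        decide ((PySem.List.slice scores (some i) (some (i + Lt.1))).sum ≥ Lt.2))))

-- the inner 'while j+1 < n and covered[j+1]: j += 1'
def fcpRunEnd (covered : List Bool) (j : Nat) : Nat :=
  if j + 1 < covered.length ∧ covered.getD (j + 1) false = true
  then fcpRunEnd covered (j + 1) else j
termination_by covered.length - j
decreasing_by omega

theorem fcpRunEnd_ge (covered : List Bool) (j : Nat) : j ≤ fcpRunEnd covered j := by
  fun_induction fcpRunEnd covered j with
  | case1 j h ih => omega
  | case2 j h => omega

-- the outer 'while i < n' sweep collecting maximal covered runs
def fcpSweep (covered : List Bool) (i : Nat) : List (Int × Int) :=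
  if i < covered.length then
    if covered.getD i false then
      ((i : Int) + 1, (fcpRunEnd covered i : Int) + 1) :: fcpSweep covered (fcpRunEnd covered i + 1)
    else fcpSweep covered (i + 1)
  else []
termination_by covered.length - i
decreasing_by
  · have := fcpRunEnd_ge covered i; omega
  · omega

def Full_Court_Pressure_alt (rally : List (List String)) : Option (List (List Int)) :=
  let scores := rally.map (fun a =>
    let x := PySem.List.pyGetD a 3 ""  -- a[3]; in range under Pre_
    if x = "Slice" ∨ x = "Net Shot" then 1 else if x = "Smash" then 2 else (0 : Int))
  let runs := fcpSweep (fcpCovered scores) 0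
  if runs = [] then none else some (runs.map (fun p => [p.1, p.2]))

-- ===== PRECONDITION & SPEC =====
-- Pre_ excludes rallies containing an action list of fewer than 4 entries, on
-- which both Pythons raise IndexError at action[3].
def Pre_Full_Court_Pressure (rally : List (List String)) : Prop :=
  ∀ action ∈ rally, 4 ≤ action.length
instance (rally : List (List String)) : Decidable (Pre_Full_Court_Pressure rally) := by
  unfold Pre_Full_Court_Pressure; infer_instance

def pvWitness_Full_Court_Pressure : List (List String) :=
  [["a", "b", "c", "Smash"], ["a", "b", "c", "Smash"], ["a", "b", "c", "Clear"]]

def Spec_Full_Court_Pressure (rally : List (List String)) (out : Option (List (List Int))) : Prop := out = Full_Court_Pressure_alt rally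
instance (rally : List (List String)) (out : Option (List (List Int))) : Decidable (Spec_Full_Court_Pressure rally out) := by unfold Spec_Full_Court_Pressure; infer_instance

-- ===== CLAIM (what is proved, stated in full; the proofs are below) =====
def Claim_equal_Full_Court_Pressure : Prop := ∀ (rally : List (List String)), Dom_Full_Court_Pressure rally → Pre_Full_Court_Pressure rally → Spec_Full_Court_Pressure rally (Full_Court_Pressure rally)

-- ===== LEMMAS AND PROOFS =====

-- coverage predicate of a list of (inclusive) integer intervals
def covP (l : List (Int × Int)) (x : Int) : Prop := ∃ p ∈ l, p.1 ≤ x ∧ x ≤ p.2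

-- "canonical form": pairwise separated by a gap, each interval nonempty
def goodI (l : List (Int × Int)) : Prop :=
  l.Pairwise (fun p q => p.2 + 1 < q.1) ∧ ∀ p ∈ l, p.1 ≤ p.2

theorem covP_nil (x : Int) : ¬ covP [] x := by simp [covP]

theorem covP_cons (p : Int × Int) (l : List (Int × Int)) (x : Int) :
    covP (p :: l) x ↔ (p.1 ≤ x ∧ x ≤ p.2) ∨ covP l x := by
  simp [covP]

theorem covP_singleton (p : Int × Int) (x : Int) : covP [p] x ↔ p.1 ≤ x ∧ x ≤ p.2 := by
  simp [covP]

theorem covP_append (l1 l2 : List (Int × Int)) (x : Int) :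
    covP (l1 ++ l2) x ↔ covP l1 x ∨ covP l2 x := by
  simp [covP, List.mem_append, or_and_right, exists_or]

theorem covP_congr_mem (l1 l2 : List (Int × Int)) (h : ∀ p, p ∈ l1 ↔ p ∈ l2) (x : Int) :
    covP l1 x ↔ covP l2 x := by
  simp only [covP, h]

-- canonical decompositions with the same coverage are equal
theorem covP_head_min (p : Int × Int) (t : List (Int × Int)) (g : goodI (p :: t)) :
    ∀ x, covP (p :: t) x → p.1 ≤ x := by
  rintro x ⟨r, hr, hr1, hr2⟩
  rcases List.mem_cons.1 hr with rfl | hr'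
  · exact hr1
  · have h1 := (List.pairwise_cons.1 g.1).1 r hr'
    have h2 := g.2 p (List.mem_cons_self)
    omega

theorem goodI_tail (p : Int × Int) (t : List (Int × Int)) (g : goodI (p :: t)) : goodI t :=
  ⟨(List.pairwise_cons.1 g.1).2, fun q hq => g.2 q (List.mem_cons_of_mem _ hq)⟩

theorem covUniq : ∀ (M1 M2 : List (Int × Int)), goodI M1 → goodI M2 →
    (∀ x, covP M1 x ↔ covP M2 x) → M1 = M2 := by
  intro M1
  induction M1 with
  | nil =>
      intro M2 g1 g2 hcov
      cases M2 with
      | nil => rfl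
      | cons q t2 =>
          exfalso
          exact covP_nil q.1 ((hcov q.1).2
            ⟨q, List.mem_cons_self, le_rfl, g2.2 q List.mem_cons_self⟩)
  | cons p t1 ih =>
      intro M2 g1 g2 hcov
      cases M2 with
      | nil =>
          exfalso
          exact covP_nil p.1 ((hcov p.1).1
            ⟨p, List.mem_cons_self, le_rfl, g1.2 p List.mem_cons_self⟩)
      | cons q t2 =>
          have hvp : p.1 ≤ p.2 := g1.2 p List.mem_cons_self
          have hvq : q.1 ≤ q.2 := g2.2 q List.mem_cons_self
          have hgap1 := (List.pairwise_cons.1 g1.1).1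
          have hgap2 := (List.pairwise_cons.1 g2.1).1
          have h11 : p.1 = q.1 := by
            have ha : q.1 ≤ p.1 := covP_head_min q t2 g2 p.1
              ((hcov p.1).1 ⟨p, List.mem_cons_self, le_rfl, hvp⟩)
            have hb : p.1 ≤ q.1 := covP_head_min p t1 g1 q.1
              ((hcov q.1).2 ⟨q, List.mem_cons_self, le_rfl, hvq⟩)
            omega
          have h22 : p.2 = q.2 := by
            rcases lt_trichotomy p.2 q.2 with h | h | h
            · exfalso
              have hx : covP (q :: t2) (p.2 + 1) :=
                ⟨q, List.mem_cons_self, by omega, by omega⟩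
              obtain ⟨r, hr, hr1, hr2⟩ := (hcov (p.2 + 1)).2 hx
              rcases List.mem_cons.1 hr with rfl | hr'
              · omega
              · have := hgap1 r hr'; omega
            · exact h
            · exfalso
              have hx : covP (p :: t1) (q.2 + 1) :=
                ⟨p, List.mem_cons_self, by omega, by omega⟩
              obtain ⟨r, hr, hr1, hr2⟩ := (hcov (q.2 + 1)).1 hx
              rcases List.mem_cons.1 hr with rfl | hr'
              · omega
              · have := hgap2 r hr'; omega
          have htails : ∀ x, covP t1 x ↔ covP t2 x := by
            intro x
            constructor
            · rintro ⟨r, hr, hr1, hr2⟩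
              have hbig : p.2 + 1 < x := by have := hgap1 r hr; omega
              obtain ⟨r', hr', hr1', hr2'⟩ :=
                (hcov x).1 ⟨r, List.mem_cons_of_mem _ hr, hr1, hr2⟩
              rcases List.mem_cons.1 hr' with rfl | hrt
              · omega
              · exact ⟨r', hrt, hr1', hr2'⟩
            · rintro ⟨r, hr, hr1, hr2⟩
              have hbig : q.2 + 1 < x := by have := hgap2 r hr; omega
              obtain ⟨r', hr', hr1', hr2'⟩ :=
                (hcov x).2 ⟨r, List.mem_cons_of_mem _ hr, hr1, hr2⟩
              rcases List.mem_cons.1 hr' with rfl | hrt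
              · omega
              · exact ⟨r', hrt, hr1', hr2'⟩
          have hpq : p = q := Prod.ext h11 h22
          rw [hpq, ih t2 (goodI_tail p t1 g1) (goodI_tail q t2 g2) htails]

-- the merge fold: preserves canonical form and accumulates coverage
theorem mergeFold_spec : ∀ (rest acc : List (Int × Int)) (last : Int × Int),
    (∀ p ∈ acc ++ [last], p.1 ≤ p.2) → (∀ p ∈ rest, p.1 ≤ p.2) →
    (acc ++ [last]).Pairwise (fun p q => p.2 + 1 < q.1) →
    (∀ r ∈ rest, last.1 ≤ r.1) → rest.Pairwise (fun a b => a.1 ≤ b.1) →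
    goodI ((rest.foldl fcpMergeStep (acc, last)).1 ++ [(rest.foldl fcpMergeStep (acc, last)).2]) ∧
    (∀ x, covP ((rest.foldl fcpMergeStep (acc, last)).1 ++ [(rest.foldl fcpMergeStep (acc, last)).2]) x ↔
      covP (acc ++ [last]) x ∨ covP rest x) := by
  intro rest
  induction rest with
  | nil =>
      intro acc last hval _ hpair _ _
      exact ⟨⟨hpair, hval⟩, fun x => (or_iff_left (covP_nil x)).symm⟩
  | cons cur rest' ih =>
      intro acc last hval hvrest hpair hlast hsorted
      have hvlast : last.1 ≤ last.2 := hval last (by simp)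
      have hvcur : cur.1 ≤ cur.2 := hvrest cur List.mem_cons_self
      have hlc : last.1 ≤ cur.1 := hlast cur List.mem_cons_self
      simp only [List.foldl_cons, fcpMergeStep]
      by_cases hm : cur.1 ≤ last.2 + 1
      · rw [if_pos hm]
        obtain ⟨hg, hcov⟩ := ih acc (last.1, max last.2 cur.2)
          (by
            intro p hp
            rcases List.mem_append.1 hp with hp | hp
            · exact hval p (List.mem_append.2 (Or.inl hp))
            · have : p = (last.1, max last.2 cur.2) := by simpa using hp
              subst this; simp only; omega)
          (fun p hp => hvrest p (List.mem_cons_of_mem _ hp))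
          (by
            rcases List.pairwise_append.1 hpair with ⟨hpa, _, hrel⟩
            refine List.pairwise_append.2 ⟨hpa, by simp, ?_⟩
            intro a ha b hb
            have hb' : b = (last.1, max last.2 cur.2) := by simpa using hb
            subst hb'
            exact hrel a ha last (by simp))
          (fun r hr => hlast r (List.mem_cons_of_mem _ hr))
          (List.pairwise_cons.1 hsorted).2
        refine ⟨hg, fun x => (hcov x).trans ?_⟩
        simp only [covP_append, covP_cons, covP_singleton]
        have hiff : ((last.1, max last.2 cur.2).1 ≤ x ∧ x ≤ (last.1, max last.2 cur.2).2) ↔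
            ((last.1 ≤ x ∧ x ≤ last.2) ∨ (cur.1 ≤ x ∧ x ≤ cur.2)) := by
          simp only
          omega
        rw [hiff]
        tauto
      · rw [if_neg hm]
        obtain ⟨hg, hcov⟩ := ih (acc ++ [last]) cur
          (by
            intro p hp
            rcases List.mem_append.1 hp with hp | hp
            · exact hval p hp
            · have : p = cur := by simpa using hp
              subst this; exact hvcur)
          (fun p hp => hvrest p (List.mem_cons_of_mem _ hp))
          (by
            refine List.pairwise_append.2 ⟨hpair, by simp, ?_⟩
            intro a ha b hb
            have hb' : b = cur := by simpa using hb
            subst hb'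
            rcases List.mem_append.1 ha with ha | ha
            · rcases List.pairwise_append.1 hpair with ⟨_, _, hrel⟩
              have := hrel a ha last (by simp)
              omega
            · have : a = last := by simpa using ha
              subst this; omega)
          (fun r hr => (List.pairwise_cons.1 hsorted).1 r hr)
          (List.pairwise_cons.1 hsorted).2
        refine ⟨hg, fun x => (hcov x).trans ?_⟩
        simp only [covP_append, covP_cons, covP_singleton]
        tauto

-- union_intervals of one bucket yields the canonical decomposition of its coverage
theorem union_spec (pieces : List (Int × Int)) (hv : ∀ p ∈ pieces, p.1 ≤ p.2) :
    goodI (union_intervals [pieces]) ∧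
    (∀ x, covP (union_intervals [pieces]) x ↔ covP pieces x) := by
  unfold union_intervals
  rw [if_neg (by simp : ¬([pieces] = ([] : List (List (Int × Int)))))]
  have hfl : ([pieces] : List (List (Int × Int))).flatten = pieces := by simp
  simp only [hfl]
  by_cases hp : pieces = []
  · rw [if_pos hp]
    subst hp
    exact ⟨⟨List.Pairwise.nil, by simp⟩, fun x => Iff.rfl⟩
  · rw [if_neg hp]
    obtain ⟨fst0, rst0, hs⟩ : ∃ f r, PySem.List.sorted pieces (fun p => p.1) false = f :: r := by
      cases hx : PySem.List.sorted pieces (fun p => p.1) false with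
      | nil => exact absurd ((PySem.List.sorted_eq_nil_iff pieces _ false).1 hx) hp
      | cons f r => exact ⟨f, r, rfl⟩
    simp only [hs, PySem.List.pyGetD_zero_cons, PySem.List.slice_from_one, List.tail_cons]
    have hpw : List.Pairwise (fun a b : Int × Int => a.1 ≤ b.1) (fst0 :: rst0) := by
      rw [← hs]; exact PySem.List.sorted_pairwise pieces (fun p => p.1)
    have hmem : ∀ p, p ∈ fst0 :: rst0 ↔ p ∈ pieces := by
      intro p; rw [← hs]; exact PySem.List.mem_sorted pieces _ false p
    obtain ⟨hg, hcov⟩ := mergeFold_spec rst0 [] fst0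
      (by
        intro p hp0
        have hp1 : p ∈ fst0 :: rst0 := List.mem_cons.2 (Or.inl (by simpa using hp0))
        exact hv p ((hmem p).1 hp1))
      (fun p hp => hv p ((hmem p).1 (List.mem_cons_of_mem _ hp)))
      (by simp)
      (List.pairwise_cons.1 hpw).1
      (List.pairwise_cons.1 hpw).2
    have hlt : List.Pairwise (fun a b : Int × Int => a.2 < b.2)
        ((rst0.foldl fcpMergeStep ([], fst0)).1 ++ [(rst0.foldl fcpMergeStep ([], fst0)).2]) := by
      refine List.Pairwise.imp_of_mem ?_ hg.1
      intro a b _ hb hr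
      have := hg.2 b hb
      omega
    have hsorted2 : PySem.List.sorted
        ((rst0.foldl fcpMergeStep ([], fst0)).1 ++ [(rst0.foldl fcpMergeStep ([], fst0)).2])
        (fun p => p.2) false
        = (rst0.foldl fcpMergeStep ([], fst0)).1 ++ [(rst0.foldl fcpMergeStep ([], fst0)).2] :=
      PySem.List.sorted_eq_of_perm_of_pairwise_lt _ _ _ (List.Perm.refl _) hlt
    rw [hsorted2]
    refine ⟨hg, fun x => (hcov x).trans ?_⟩
    have hstep : covP ([] ++ [fst0]) x ∨ covP rst0 x ↔ covP (fst0 :: rst0) x := by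
      rw [List.nil_append, covP_singleton, covP_cons]
    rw [hstep]
    exact covP_congr_mem _ _ hmem x

-- prefix sums characterisation
theorem foldl_range_prefix (actions : List String) (m : Nat) (hm : m ≤ actions.length) :
    (List.range m).foldl (fun ps i => ps ++ [ps.getD i 0 + pyScore (actions.getD i "")]) [0]
      = (List.range (m + 1)).map (fun k => ((actions.map pyScore).take k).sum) := by
  induction m with
  | zero => simp
  | succ m ih =>
      rw [List.range_succ, List.foldl_append, ih (by omega)]
      rw [List.range_succ (n := m + 1)]
      simp only [List.foldl_cons, List.foldl_nil, List.map_append, List.map_cons, List.map_nil]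
      congr 1
      have hget : ((List.range (m + 1)).map (fun k => ((actions.map pyScore).take k).sum)).getD m 0
          = ((actions.map pyScore).take m).sum := by
        rw [List.getD_eq_getElem?_getD]
        simp
      rw [hget]
      have hmlt : m < actions.length := by omega
      have htake : (actions.map pyScore).take (m + 1)
          = (actions.map pyScore).take m ++ [(actions.map pyScore)[m]'(by simpa using hmlt)] := by
        rw [List.take_add_one]
        simp [List.getElem?_eq_getElem (by simpa using hmlt)]
      rw [htake]
      simp [List.sum_append, List.getD_eq_getElem?_getD, List.getElem?_eq_getElem hmlt]

theorem fcpPrefix_eq (actions : List String) :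
    fcpPrefix actions =
      (List.range (actions.length + 1)).map (fun k => ((actions.map pyScore).take k).sum) := by
  exact foldl_range_prefix actions actions.length le_rfl

-- A's prefix-difference window score = B's slice sum
theorem window_eq (actions : List String) (i L : Int) (h0 : 0 ≤ i) (hL : 0 ≤ L)
    (hn : i + L ≤ (actions.length : Int)) :
    PySem.List.pyGetD (fcpPrefix actions) (i + L) 0 - PySem.List.pyGetD (fcpPrefix actions) i 0 =
      (PySem.List.slice (actions.map pyScore) (some i) (some (i + L))).sum := by
  have hlen : (actions.map pyScore).length = actions.length := by simp
  rw [fcpPrefix_eq, PySem.List.slice_toNat _ h0 (by omega)]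
  have h1 : PySem.List.pyGetD ((List.range (actions.length + 1)).map
      (fun k => ((actions.map pyScore).take k).sum)) (i + L) 0
      = ((actions.map pyScore).take (i + L).toNat).sum := by
    rw [PySem.List.pyGetD_eq_getElem _ _ (by omega) (by simp; omega)]
    simp
  have h2 : PySem.List.pyGetD ((List.range (actions.length + 1)).map
      (fun k => ((actions.map pyScore).take k).sum)) i 0
      = ((actions.map pyScore).take i.toNat).sum := by
    rw [PySem.List.pyGetD_eq_getElem _ _ h0 (by simp; omega)]
    simp
  have h3 : List.take (i + L).toNat (List.map pyScore actions)
      = List.take i.toNat (List.map pyScore actions)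
        ++ List.take ((i + L).toNat - i.toNat) (List.drop i.toNat (List.map pyScore actions)) := by
    rw [← List.take_add]; congr 1; omega
  rw [h1, h2, h3, List.sum_append]
  ring

-- 'out.append(g(c)) if P(c)' fold: membership characterisation
theorem foldl_append_if_mem {α β : Type} (l : List α) (P : α → Prop) [DecidablePred P]
    (g : α → β) (acc : List β) (x : β) :
    x ∈ l.foldl (fun a c => if P c then a ++ [g c] else a) acc ↔
      x ∈ acc ∨ ∃ c ∈ l, P c ∧ x = g c := by
  induction l generalizing acc with
  | nil => simp
  | cons c l ih =>
      simp only [List.foldl_cons]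
      by_cases h : P c
      · rw [if_pos h, ih]
        simp only [List.mem_append, List.mem_cons, List.not_mem_nil, or_false]
        constructor
        · rintro ((hx | rfl) | ⟨c', hc', hp, rfl⟩)
          · exact Or.inl hx
          · exact Or.inr ⟨c, Or.inl rfl, h, rfl⟩
          · exact Or.inr ⟨c', Or.inr hc', hp, rfl⟩
        · rintro (hx | ⟨c', (rfl | hc'), hp, rfl⟩)
          · exact Or.inl (Or.inl hx)
          · exact Or.inl (Or.inr rfl)
          · exact Or.inr ⟨c', hc', hp, rfl⟩
      · rw [if_neg h, ih]
        constructor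
        · rintro (hx | ⟨c', hc', hp, rfl⟩)
          · exact Or.inl hx
          · exact Or.inr ⟨c', List.mem_cons_of_mem _ hc', hp, rfl⟩
        · rintro (hx | ⟨c', hc', hp, rfl⟩)
          · exact Or.inl hx
          · rcases List.mem_cons.1 hc' with rfl | hc'
            · exact absurd hp h
            · exact Or.inr ⟨c', hc', hp, rfl⟩

-- membership in A's interval list
theorem mem_fcpIntervals (actions : List String) (p : Int × Int) :
    p ∈ fcpIntervals actions ↔
      ∃ Lt ∈ fcpTargets, ∃ i : Int, 0 ≤ i ∧ i < (actions.length : Int) - Lt.1 + 1 ∧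
        (PySem.List.slice (actions.map pyScore) (some i) (some (i + Lt.1))).sum ≥ Lt.2 ∧
        p = (i + 1, i + Lt.1) := by
  unfold fcpIntervals
  simp only [fcpTargets, List.foldl_cons, List.foldl_nil]
  rw [foldl_append_if_mem, foldl_append_if_mem, foldl_append_if_mem]
  simp only [List.not_mem_nil, false_or, PySem.List.mem_pyRange_one]
  constructor
  · rintro ((⟨i, ⟨h1, h2⟩, hc, rfl⟩ | ⟨i, ⟨h1, h2⟩, hc, rfl⟩) | ⟨i, ⟨h1, h2⟩, hc, rfl⟩)
    · exact ⟨(2, 3), by simp [fcpTargets], i, h1, h2,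
        by rw [← window_eq actions i 2 h1 (by omega) (by omega)]; exact hc, rfl⟩
    · exact ⟨(3, 4), by simp [fcpTargets], i, h1, h2,
        by rw [← window_eq actions i 3 h1 (by omega) (by omega)]; exact hc, rfl⟩
    · exact ⟨(4, 5), by simp [fcpTargets], i, h1, h2,
        by rw [← window_eq actions i 4 h1 (by omega) (by omega)]; exact hc, rfl⟩
  · rintro ⟨Lt, hLt, i, h1, h2, hc, rfl⟩
    have hLt' : Lt = ((2 : Int), (3 : Int)) ∨ Lt = (3, 4) ∨ Lt = (4, 5) := by
      simpa [fcpTargets] using hLt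
    rcases hLt' with rfl | rfl | rfl
    · exact Or.inl (Or.inl ⟨i, ⟨h1, h2⟩,
        by rw [window_eq actions i 2 h1 (by omega) (by omega)]; exact hc, rfl⟩)
    · exact Or.inl (Or.inr ⟨i, ⟨h1, h2⟩,
        by rw [window_eq actions i 3 h1 (by omega) (by omega)]; exact hc, rfl⟩)
    · exact Or.inr ⟨i, ⟨h1, h2⟩,
        by rw [window_eq actions i 4 h1 (by omega) (by omega)]; exact hc, rfl⟩

-- B's covered array characterisation
theorem covered_getD (scores : List Int) (j : Nat) (hj : j < scores.length) :
    (fcpCovered scores).getD j false = true ↔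
      ∃ Lt ∈ fcpTargets, ∃ i : Int,
        max 0 ((j : Int) - Lt.1 + 1) ≤ i ∧ i < min ((j : Int) + 1) ((scores.length : Int) - Lt.1 + 1) ∧
        (PySem.List.slice scores (some i) (some (i + Lt.1))).sum ≥ Lt.2 := by
  rw [← PySem.List.pyGetD_natCast]
  unfold fcpCovered
  rw [PySem.List.pyGetD_map_pyRange _ _ _ _ hj]
  simp [fcpTargets, List.any_eq_true, PySem.List.mem_pyRange_one, and_assoc]

theorem length_fcpCovered (scores : List Int) : (fcpCovered scores).length = scores.length := by
  simp [fcpCovered, PySem.List.length_pyRange_one]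

-- facts about fcpRunEnd
theorem fcpRunEnd_lt (covered : List Bool) (j : Nat) (h : j < covered.length) :
    fcpRunEnd covered j < covered.length := by
  fun_induction fcpRunEnd covered j with
  | case1 j h ih => exact ih (by omega)
  | case2 j h => exact ‹_›

theorem fcpRunEnd_covered (covered : List Bool) (j : Nat) (hc : covered.getD j false = true) :
    ∀ k, j ≤ k → k ≤ fcpRunEnd covered j → covered.getD k false = true := by
  fun_induction fcpRunEnd covered j with
  | case1 j h ih =>
      intro k hk1 hk2
      rcases Nat.eq_or_lt_of_le hk1 with h1 | h1
      · exact h1 ▸ hc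
      · exact ih h.2 k (by omega) hk2
  | case2 j h =>
      intro k hk1 hk2
      have : k = j := by omega
      exact this ▸ hc

theorem fcpRunEnd_stop (covered : List Bool) (j : Nat) :
    ¬ (fcpRunEnd covered j + 1 < covered.length ∧ covered.getD (fcpRunEnd covered j + 1) false = true) := by
  fun_induction fcpRunEnd covered j with
  | case1 j h ih => exact ih
  | case2 j h => exact h

-- the sweep is canonical and covers exactly the covered positions from i on
theorem fcpSweep_spec (covered : List Bool) (i : Nat) :
    goodI (fcpSweep covered i) ∧
    (∀ x, covP (fcpSweep covered i) x ↔
      ∃ k : Nat, i ≤ k ∧ k < covered.length ∧ covered.getD k false = true ∧ x = (k : Int) + 1) := by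
  fun_induction fcpSweep covered i with
  | case1 i hi hc ih =>
      obtain ⟨⟨ihp, ihv⟩, ihcov⟩ := ih
      have hge := fcpRunEnd_ge covered i
      have hlt := fcpRunEnd_lt covered i hi
      have hstop := fcpRunEnd_stop covered i
      refine ⟨⟨?_, ?_⟩, ?_⟩
      · refine List.pairwise_cons.2 ⟨?_, ihp⟩
        intro q hq
        have hq1 : covP (fcpSweep covered (fcpRunEnd covered i + 1)) q.1 :=
          ⟨q, hq, le_rfl, ihv q hq⟩
        obtain ⟨k, hk1, hk2, hk3, hk4⟩ := (ihcov q.1).1 hq1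
        have hkne : k ≠ fcpRunEnd covered i + 1 := by
          intro h; exact hstop ⟨h ▸ hk2, h ▸ hk3⟩
        simp only
        omega
      · intro p hp
        rcases List.mem_cons.1 hp with rfl | hp'
        · simp only; omega
        · exact ihv p hp' 
      · intro x
        rw [covP_cons]
        constructor
        · rintro (⟨hx1, hx2⟩ | hx)
          · simp only at hx1 hx2
            refine ⟨(x - 1).toNat, by omega, by omega, ?_, by omega⟩
            exact fcpRunEnd_covered covered i hc (x - 1).toNat (by omega) (by omega)
          · obtain ⟨k, hk1, hk2, hk3, hk4⟩ := (ihcov x).1 hx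
            exact ⟨k, by omega, hk2, hk3, hk4⟩
        · rintro ⟨k, hk1, hk2, hk3, rfl⟩
          by_cases hkle : k ≤ fcpRunEnd covered i
          · exact Or.inl ⟨by simp only; omega, by simp only; omega⟩
          · exact Or.inr ((ihcov _).2 ⟨k, by omega, hk2, hk3, rfl⟩)
  | case2 i hi hc ih =>
      obtain ⟨ihg, ihcov⟩ := ih
      refine ⟨ihg, fun x => (ihcov x).trans ?_⟩
      constructor
      · rintro ⟨k, hk1, hk2, hk3, hk4⟩; exact ⟨k, by omega, hk2, hk3, hk4⟩
      · rintro ⟨k, hk1, hk2, hk3, hk4⟩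
        refine ⟨k, ?_, hk2, hk3, hk4⟩
        rcases Nat.eq_or_lt_of_le hk1 with rfl | h
        · exact absurd hk3 (by simpa using hc)
        · omega
  | case3 i hi =>
      refine ⟨⟨List.Pairwise.nil, by simp⟩, fun x => ?_⟩
      constructor
      · intro h; exact absurd h (covP_nil x)
      · rintro ⟨k, hk1, hk2, _, _⟩; omega

-- coverage of A's interval list = B's covered positions (1-indexed)
theorem cov_bridge (actions : List String) (x : Int) :
    covP (fcpIntervals actions) x ↔
      ∃ k : Nat, 0 ≤ k ∧ k < (fcpCovered (actions.map pyScore)).length ∧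
        (fcpCovered (actions.map pyScore)).getD k false = true ∧ x = (k : Int) + 1 := by
  have hlen : (actions.map pyScore).length = actions.length := by simp
  constructor
  · rintro ⟨p, hp, hx1, hx2⟩
    obtain ⟨Lt, hLt, i, h0, h2, hc, rfl⟩ := (mem_fcpIntervals actions p).1 hp
    simp only at hx1 hx2
    refine ⟨(x - 1).toNat, by omega, ?_, ?_, by omega⟩
    · rw [length_fcpCovered, hlen]; omega
    · rw [covered_getD _ _ (by rw [hlen]; omega)]
      refine ⟨Lt, hLt, i, by omega, by rw [hlen]; omega, hc⟩
  · rintro ⟨k, _, hk2, hk3, rfl⟩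
    rw [length_fcpCovered] at hk2
    obtain ⟨Lt, hLt, i, h1, h2, hc⟩ := (covered_getD _ k hk2).1 hk3
    rw [hlen] at h2
    refine ⟨(i + 1, i + Lt.1), (mem_fcpIntervals actions _).2
      ⟨Lt, hLt, i, by omega, by omega, hc, rfl⟩, by simp only; omega, by simp only; omega⟩

-- ===== VERDICT (by name: the statement is the Claim_ definition above) =====
theorem Full_Court_Pressure_spec : Claim_equal_Full_Court_Pressure := by
  intro rally _ _
  have hvalid : ∀ p ∈ fcpIntervals (rally.map (fun action => PySem.List.pyGetD action 3 "")),
      p.1 ≤ p.2 := by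
    intro p hp
    obtain ⟨Lt, hLt, i, _, _, _, rfl⟩ := (mem_fcpIntervals _ p).1 hp
    have hLt' : Lt = ((2 : Int), (3 : Int)) ∨ Lt = (3, 4) ∨ Lt = (4, 5) := by
      simpa [fcpTargets] using hLt
    rcases hLt' with rfl | rfl | rfl <;> simp only <;> omega
  obtain ⟨hgA, hcovA⟩ := union_spec _ hvalid
  obtain ⟨hgB, hcovB⟩ := fcpSweep_spec
    (fcpCovered ((rally.map (fun action => PySem.List.pyGetD action 3 "")).map pyScore)) 0
  have hmain : union_intervals [fcpIntervals (rally.map (fun action => PySem.List.pyGetD action 3 ""))]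
      = fcpSweep (fcpCovered ((rally.map (fun action => PySem.List.pyGetD action 3 "")).map pyScore)) 0 := by
    apply covUniq _ _ hgA hgB
    intro x
    rw [hcovA x, hcovB x, cov_bridge]
  have hsc2 : (rally.map (fun a =>
      let x := PySem.List.pyGetD a 3 ""
      if x = "Slice" ∨ x = "Net Shot" then 1 else if x = "Smash" then 2 else (0 : Int)))
      = (rally.map (fun action => PySem.List.pyGetD action 3 "")).map pyScore := by
    rw [List.map_map]
    rfl
  unfold Spec_Full_Court_Pressure Full_Court_Pressure Full_Court_Pressure_alt
  simp only [hsc2, hmain]
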